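-- pv_equiv track=rewrite | github.com/FKatenbrink/Advent-of-Code | 2018/day13_2.py | collided
-- ===== SOURCE A (Python) =====
-- def collided(carts):
--     coords = {}
--     for idx, cart in enumerate(carts):
--         x, y, d, i = cart
--         c = (x, y)
--         if c in coords:
--             return (coords[c], idx)
--         else:
--             coords[c] = idx
--
--     return None
-- ===== SOURCE B (Python) =====
-- def collided(carts):
--     for j, cart_j in enumerate(carts):
--         cj = (cart_j[0], cart_j[1])
--         for i, cart_i in enumerate(carts[:j]):
--             if (cart_i[0], cart_i[1]) == cj:
--                 return (i, j)
--     return None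
-- ===== Notes on version B (the rewrite author's own statement) =====
-- stated objective: alternative
-- what changed: Replaces the single-pass dict of first-seen coordinates with a naive nested pairwise scan: for each cart j it rescans the prefix carts[:j] for the first earlier cart with equal coordinates, maintaining no auxiliary structure.
import Mathlib
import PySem

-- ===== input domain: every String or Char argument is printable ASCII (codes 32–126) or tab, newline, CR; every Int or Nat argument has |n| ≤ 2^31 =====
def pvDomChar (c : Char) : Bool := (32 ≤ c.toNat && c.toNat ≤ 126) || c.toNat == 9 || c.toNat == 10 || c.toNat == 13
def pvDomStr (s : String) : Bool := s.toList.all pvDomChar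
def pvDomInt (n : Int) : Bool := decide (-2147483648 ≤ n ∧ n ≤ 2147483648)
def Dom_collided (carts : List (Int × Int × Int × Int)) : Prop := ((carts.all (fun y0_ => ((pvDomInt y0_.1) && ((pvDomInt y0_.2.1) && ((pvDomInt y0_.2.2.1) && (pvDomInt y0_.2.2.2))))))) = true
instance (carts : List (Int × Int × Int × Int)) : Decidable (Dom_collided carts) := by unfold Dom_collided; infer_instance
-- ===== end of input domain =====

-- B replaces A's single-pass dict of first-seen coordinates with a naive nested
-- pairwise scan of the prefix before each cart (alternative decomposition, not faster).

-- ===== PORT A =====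
-- the loop body of A: walk the enumerated carts keeping the dict coords
def collidedGo (items : List (Int × (Int × Int × Int × Int)))
    (coords : PySem.Dict (Int × Int) Int) : Option (Int × Int) :=
  match items with
  | [] => none
  | (idx, cart) :: rest =>
    let c : Int × Int := (cart.1, cart.2.1)
    match coords.get? c with          -- `if c in coords: return (coords[c], idx)`
    | some j => some (j, idx)
    | none => collidedGo rest (coords.insert c idx)

def collided (carts : List (Int × Int × Int × Int)) : Option (Int × Int) :=
  collidedGo (PySem.List.enumerate carts 0) PySem.Dict.empty

-- ===== PORT B =====
-- inner loop of B: first i in enumerate(carts[:j]) whose coordinates equal cj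
def collidedAltInner (cj : Int × Int) :
    List (Int × (Int × Int × Int × Int)) → Option Int
  | [] => none
  | (i, ci) :: rest =>
    if (ci.1, ci.2.1) = cj then some i else collidedAltInner cj rest

-- outer loop of B over enumerate(carts)
def collidedAltGo (carts : List (Int × Int × Int × Int)) :
    List (Int × (Int × Int × Int × Int)) → Option (Int × Int)
  | [] => none
  | (j, cj) :: rest =>
    match collidedAltInner (cj.1, cj.2.1)
        (PySem.List.enumerate (PySem.List.slice carts none (some j)) 0) with
    | some i => some (i, j)
    | none => collidedAltGo carts rest

def collided_alt (carts : List (Int × Int × Int × Int)) : Option (Int × Int) :=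
  collidedAltGo carts (PySem.List.enumerate carts 0)

-- ===== PRECONDITION & SPEC =====
def Spec_collided (carts : List (Int × Int × Int × Int)) (out : Option (Int × Int)) : Prop := out = collided_alt carts
instance (carts : List (Int × Int × Int × Int)) (out : Option (Int × Int)) : Decidable (Spec_collided carts out) := by unfold Spec_collided; infer_instance

-- ===== CLAIM (what is proved, stated in full; the proofs are below) =====
def Claim_equal_collided : Prop := ∀ (carts : List (Int × Int × Int × Int)), Dom_collided carts → Spec_collided carts (collided carts)

-- ===== LEMMAS AND PROOFS =====

theorem collidedAltInner_append_singleton (cj : Int × Int)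
    (l : List (Int × (Int × Int × Int × Int))) (i : Int) (ci : Int × Int × Int × Int) :
    collidedAltInner cj (l ++ [(i, ci)]) =
      match collidedAltInner cj l with
      | some k => some k
      | none => if (ci.1, ci.2.1) = cj then some i else none := by
  induction l with
  | nil => simp [collidedAltInner]
  | cons p rest ih =>
    obtain ⟨a, b⟩ := p
    by_cases h : (b.1, b.2.1) = cj <;> simp [collidedAltInner, h, ih]

theorem collided_go_eq (rest seen : List (Int × Int × Int × Int))
    (d : PySem.Dict (Int × Int) Int)
    (hinv : ∀ c : Int × Int, d.get? c =
      collidedAltInner c (PySem.List.enumerate seen 0)) :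
    collidedGo (PySem.List.enumerate rest (seen.length : Int)) d =
      collidedAltGo (seen ++ rest) (PySem.List.enumerate rest (seen.length : Int)) := by
  induction rest generalizing seen d with
  | nil => simp [PySem.List.enumerate_nil, collidedGo, collidedAltGo]
  | cons cj rest ih =>
    rw [PySem.List.enumerate_cons]
    have hslice : PySem.List.slice (seen ++ cj :: rest) none (some (seen.length : Int))
        = seen := by
      rw [PySem.List.slice_to_natCast]
      simp
    simp only [collidedGo, collidedAltGo, hslice, ← hinv (cj.1, cj.2.1)]
    cases hg : d.get? (cj.1, cj.2.1) with
    | some i => rfl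
    | none =>
      simp only []
      have hlen : ((seen.length : Int) + 1) = (((seen ++ [cj]).length : Nat) : Int) := by
        simp
      have happ : seen ++ cj :: rest = (seen ++ [cj]) ++ rest := by simp
      rw [hlen, happ]
      apply ih
      intro c
      rw [PySem.List.enumerate_append, PySem.List.enumerate_cons,
        PySem.List.enumerate_nil]
      rw [collidedAltInner_append_singleton, ← hinv c]
      by_cases hc : c = (cj.1, cj.2.1)
      · subst hc
        simp [PySem.Dict.get?_insert_self, hg]
      · rw [PySem.Dict.get?_insert_of_ne _ _ hc]
        cases hdc : d.get? c with
        | some k => rfl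
        | none =>
          have : ¬ ((cj.1, cj.2.1) = c) := fun h => hc h.symm
          simp [this]

-- ===== VERDICT (by name: the statement is the Claim_ definition above) =====
theorem collided_spec : Claim_equal_collided := by
  intro carts _
  unfold Spec_collided collided collided_alt
  have h := collided_go_eq carts [] PySem.Dict.empty
    (by intro c; simp [PySem.Dict.get?_empty, PySem.List.enumerate_nil, collidedAltInner])
  simpa using h
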